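-- pv_equiv track=rewrite | github.com/IvanaaXD/SIIT | SEMESTAR 4/Upravljanje informacijama/LITERATURA/Kolokvijum jun 2024 - G2/MapReduce/Tesko/rjesenje.py | reduce2
-- ===== SOURCE A (Python) =====
-- def dict_to_list_of_tuples(dict):
--     list_of_tuples = []
--
--     for key, value in dict.items():
--         list_of_tuples.append((key, value))
--
--     return list_of_tuples
--
-- def reduce2(data):
--     dict = {}
--     for key, value in data:
--         if key in dict:
--             list = dict[key]
--             list[0] += value
--             list[1] += 1
--             dict[key] = list
--         else:
--             dict[key] = [value, 1]
--
--     dict2 = {}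
--     for key, value in dict.items():
--         dict2[key] = int(value[0] / value[1])
--
--     return dict_to_list_of_tuples(dict2)
-- ===== SOURCE B (Python) =====
-- def reduce2(data):
--     groups = {}
--     for key, value in data:
--         groups.setdefault(key, []).append(value)
--     return [(key, int(sum(values) / len(values))) for key, values in groups.items()]
-- ===== Notes on version B (the rewrite author's own statement) =====
-- stated objective: simpler
-- what changed: B groups each key's full value list in one dict pass (setdefault/append) and computes each average in a comprehension over the dict items, instead of A's running [sum,count] accumulators, second averaging dict and explicit tuple-building loop.
import Mathlib
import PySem

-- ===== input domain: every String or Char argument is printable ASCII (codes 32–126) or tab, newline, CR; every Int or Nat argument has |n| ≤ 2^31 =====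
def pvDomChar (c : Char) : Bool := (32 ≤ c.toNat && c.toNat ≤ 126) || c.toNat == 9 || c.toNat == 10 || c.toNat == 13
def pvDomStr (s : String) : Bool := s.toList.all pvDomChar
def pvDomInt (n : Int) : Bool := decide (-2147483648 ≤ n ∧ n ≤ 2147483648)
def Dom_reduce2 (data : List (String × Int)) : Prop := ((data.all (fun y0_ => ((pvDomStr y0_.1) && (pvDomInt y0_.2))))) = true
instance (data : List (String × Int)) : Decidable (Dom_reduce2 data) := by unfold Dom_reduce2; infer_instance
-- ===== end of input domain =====

-- B replaces A's running [sum,count] accumulators, second averaging dict and explicit tuple-building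
-- loop by one grouping dict of full value lists plus a comprehension (simpler decomposition, same cost).

-- ===== PORT A =====
def dictToListOfTuples (d : PySem.Dict String Int) : List (String × Int) :=
  d.items.foldl (fun acc p => acc ++ [p]) []

def reduce2 (data : List (String × Int)) : List (String × Int) :=
  let d := data.foldl (fun d p =>
    if d.contains p.1 then
      let l := d.getD p.1 (0, 0)    -- key is present: the getD default is never used
      d.insert p.1 (l.1 + p.2, l.2 + 1)
    else
      d.insert p.1 (p.2, 1)) PySem.Dict.empty
  -- int(value[0] / value[1]) is truncating division: PySem.Int.truncdiv (exact for |sum| < 2^53)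
  let d2 := d.items.foldl (fun d2 p => d2.insert p.1 (PySem.Int.truncdiv p.2.1 p.2.2))
    PySem.Dict.empty
  dictToListOfTuples d2

-- ===== PORT B =====
def reduce2_alt (data : List (String × Int)) : List (String × Int) :=
  -- groups.setdefault(key, []).append(value) = modify key [] (· ++ [value])
  let groups := data.foldl (fun d p => d.modify p.1 [] (· ++ [p.2])) PySem.Dict.empty
  groups.items.map (fun p => (p.1, PySem.Int.truncdiv p.2.sum (p.2.length : Int)))

-- ===== PRECONDITION & SPEC =====
def Spec_reduce2 (data : List (String × Int)) (out : List (String × Int)) : Prop := out = reduce2_alt data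
instance (data : List (String × Int)) (out : List (String × Int)) : Decidable (Spec_reduce2 data out) := by unfold Spec_reduce2; infer_instance

-- ===== CLAIM (what is proved, stated in full; the proofs are below) =====
def Claim_equal_reduce2 : Prop := ∀ (data : List (String × Int)), Dom_reduce2 data → Spec_reduce2 data (reduce2 data)

-- ===== LEMMAS AND PROOFS =====

-- proof-only abbreviation: summarise a value list as its (sum, count) pair
def pvSum (p : String × List Int) : String × (Int × Int) := (p.1, (p.2.sum, (p.2.length : Int)))

-- one element: A's accumulator step on the (sum,count) image of B's grouping dict is the image of B's step
theorem pv_step (db : PySem.Dict String (List Int)) (p : String × Int) :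
    (if (PySem.Dict.mk (db.items.map pvSum)).contains p.1 then
      let l := (PySem.Dict.mk (db.items.map pvSum)).getD p.1 (0, 0)
      (PySem.Dict.mk (db.items.map pvSum)).insert p.1 (l.1 + p.2, l.2 + 1)
    else
      (PySem.Dict.mk (db.items.map pvSum)).insert p.1 (p.2, 1))
    = PySem.Dict.mk ((db.modify p.1 [] (· ++ [p.2])).items.map pvSum) := by
  have hc : (PySem.Dict.mk (db.items.map pvSum)).contains p.1 = db.contains p.1 := by
    simp only [PySem.Dict.contains, List.any_map]
    congr 1
  have hf : (db.items.map pvSum).find? (fun q => q.1 == p.1)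
      = (db.items.find? (fun q => q.1 == p.1)).map pvSum := by
    rw [List.find?_map]
    congr 1
  rw [PySem.Dict.modify]
  by_cases h : db.contains p.1 = true
  · obtain ⟨vs, hvs⟩ : ∃ vs, db.get? p.1 = some vs := by
      rw [← Option.isSome_iff_exists, ← PySem.Dict.contains_eq_isSome_get?]; exact h
    have hfind : db.items.find? (fun q => q.1 == p.1) = some (p.1, vs) := by
      simp only [PySem.Dict.get?] at hvs
      obtain ⟨q, hq, hq2⟩ := Option.map_eq_some_iff.mp hvs
      have := List.find?_some hq
      cases q; simp_all
    have hget : (PySem.Dict.mk (db.items.map pvSum)).getD p.1 (0, 0) = (vs.sum, (vs.length : Int)) := by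
      simp only [PySem.Dict.getD, PySem.Dict.get?, hf, hfind]
      simp [pvSum]
    have hgetB : db.getD p.1 [] = vs := by
      simp [PySem.Dict.getD, hvs]
    rw [hc, if_pos h, hget, hgetB, PySem.Dict.insert, PySem.Dict.insert, if_pos, if_pos h]
    · simp only [List.map_map, PySem.Dict.mk.injEq, List.map_inj_left]
      intro q hq
      by_cases hqk : (q.1 == p.1) = true
      · simp [Function.comp, hqk, pvSum]
      · simp [Function.comp, hqk, pvSum]
    · rw [hc]; exact h
  · have h' : db.contains p.1 = false := by simpa using h
    have hgetB : db.getD p.1 [] = [] := PySem.Dict.getD_of_not_contains db [] h'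
    rw [hc, if_neg h, hgetB, PySem.Dict.insert, PySem.Dict.insert, if_neg, if_neg]
    · simp [pvSum]
    · simp [h']
    · rw [hc, h']; simp

-- A's first loop computes exactly the (sum,count) image of B's grouping loop
theorem pv_main (l : List (String × Int)) (db : PySem.Dict String (List Int)) :
    l.foldl (fun d p =>
      if d.contains p.1 then
        let x := d.getD p.1 (0, 0)
        d.insert p.1 (x.1 + p.2, x.2 + 1)
      else
        d.insert p.1 (p.2, 1)) (PySem.Dict.mk (db.items.map pvSum))
    = PySem.Dict.mk ((l.foldl (fun d p => d.modify p.1 [] (· ++ [p.2])) db).items.map pvSum) := by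
  induction l generalizing db with
  | nil => rfl
  | cons p l ih =>
    simp only [List.foldl_cons]
    rw [pv_step]
    exact ih (db.modify p.1 [] (· ++ [p.2]))

theorem pv_final (data : List (String × Int)) : reduce2 data = reduce2_alt data := by
  have hmain := pv_main data PySem.Dict.empty
  have hempty : (PySem.Dict.empty : PySem.Dict String (List Int)).items = [] := rfl
  simp only [hempty, List.map_nil] at hmain
  set g := data.foldl (fun d p => d.modify p.1 [] (· ++ [p.2])) (PySem.Dict.empty : PySem.Dict String (List Int)) with hg
  have hnd : ((g.items.map pvSum).map Prod.fst).Nodup := by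
    have h2 : g.keys.Nodup :=
      PySem.Dict.nodup_keys_foldl_modify_key data Prod.fst [] (fun d p => (· ++ [p.2]))
        PySem.Dict.empty PySem.Dict.nodup_keys_empty
    simpa [List.map_map, Function.comp, pvSum, PySem.Dict.keys] using h2
  have hitems := PySem.Dict.items_foldl_insert_fresh (l := g.items.map pvSum)
      (k := Prod.fst) (v := fun p => PySem.Int.truncdiv p.2.1 p.2.2)
      (d := PySem.Dict.empty) (by intro a _; simp [PySem.Dict.contains_empty]) hnd
  simp only [reduce2, reduce2_alt, dictToListOfTuples]
  rw [show (PySem.Dict.mk [] : PySem.Dict String (Int × Int)) = PySem.Dict.empty from rfl] at hmain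
  rw [hmain, hitems, PySem.List.foldl_append_singleton]
  simp only [List.map_map, hempty, List.nil_append]
  rw [← hg]
  refine List.map_congr_left ?_
  intro a _
  simp [pvSum, Function.comp]

-- ===== VERDICT (by name: the statement is the Claim_ definition above) =====
theorem reduce2_spec : Claim_equal_reduce2 := by
  intro data _
  exact pv_final data
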